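-- pv_equiv track=rewrite | github.com/famachnikach/JobHunter | backend/server.py | search_jobs_linkedin_scrape
-- ===== SOURCE A (Python) =====
-- from typing import List, Optional, Dict, Any
--
-- def search_jobs_linkedin_scrape(keywords: str, location: str = "Remote", max_results: int = 20) -> List[Dict]:
--     """Simulate LinkedIn job search (in real implementation, use web scraping)"""
--     # This is a mock implementation. In production, you'd use Selenium/BeautifulSoup
--     # to scrape LinkedIn job listings
--     mock_jobs = [
--         {
--             "title": f"Senior {keywords} Developer",
--             "company": "Tech Innovators Inc",
--             "location": location,
--             "description": f"We are looking for an experienced {keywords} developer to join our dynamic team. You will work on cutting-edge projects and collaborate with cross-functional teams.",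
--             "requirements": f"5+ years experience with {keywords}, strong problem-solving skills, team player",
--             "url": f"https://linkedin.com/jobs/view/12345{i}",
--             "posted_date": "2 days ago"
--         }
--         for i in range(min(max_results, 10))
--     ]
--
--     # Add some variety
--     job_titles = ["Software Engineer", "Full Stack Developer", "Backend Developer", "Frontend Developer", "DevOps Engineer"]
--     companies = ["Google", "Microsoft", "Amazon", "Meta", "Netflix", "Uber", "Airbnb", "Spotify"]
--
--     for i, job in enumerate(mock_jobs):
--         if i < len(job_titles):
--             job["title"] = f"{job_titles[i]} - {keywords}"
--         if i < len(companies):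
--             job["company"] = companies[i]
--
--     return mock_jobs
-- ===== SOURCE B (Python) =====
-- def search_jobs_linkedin_scrape(keywords: str, location: str = "Remote", max_results: int = 20):
--     """Generate mock LinkedIn job listings from precomputed padded field tables zipped with the index range."""
--     titles = [f"{t} - {keywords}" for t in
--               ["Software Engineer", "Full Stack Developer", "Backend Developer",
--                "Frontend Developer", "DevOps Engineer"]] \
--              + [f"Senior {keywords} Developer"] * 5
--     companies = ["Google", "Microsoft", "Amazon", "Meta", "Netflix", "Uber",
--                  "Airbnb", "Spotify"] + ["Tech Innovators Inc"] * 2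
--     return [
--         {
--             "title": t,
--             "company": c,
--             "location": location,
--             "description": f"We are looking for an experienced {keywords} developer to join our dynamic team. You will work on cutting-edge projects and collaborate with cross-functional teams.",
--             "requirements": f"5+ years experience with {keywords}, strong problem-solving skills, team player",
--             "url": f"https://linkedin.com/jobs/view/12345{i}",
--             "posted_date": "2 days ago",
--         }
--         for i, t, c in zip(range(min(max_results, 10)), titles, companies)
--     ]
-- ===== Notes on version B (the rewrite author's own statement) =====
-- stated objective: alternative
-- what changed: Replaced A's build-identical-dicts-then-mutate two-pass structure with precomputed padded 10-entry title/company tables zipped with the index range, so zip truncation replaces all bounds checks and the patching pass disappears.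
import Mathlib
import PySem

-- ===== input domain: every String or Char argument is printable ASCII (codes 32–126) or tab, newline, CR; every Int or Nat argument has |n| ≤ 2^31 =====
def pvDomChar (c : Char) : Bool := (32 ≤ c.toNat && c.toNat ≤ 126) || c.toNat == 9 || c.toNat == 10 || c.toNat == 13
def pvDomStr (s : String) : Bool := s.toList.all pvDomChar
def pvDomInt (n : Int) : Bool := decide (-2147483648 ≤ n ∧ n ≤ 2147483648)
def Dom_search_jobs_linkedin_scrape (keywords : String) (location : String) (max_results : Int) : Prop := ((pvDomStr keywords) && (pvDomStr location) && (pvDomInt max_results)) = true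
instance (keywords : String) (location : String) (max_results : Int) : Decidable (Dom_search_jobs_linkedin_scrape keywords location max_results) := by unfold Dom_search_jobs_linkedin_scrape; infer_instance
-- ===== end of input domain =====

-- B replaces A's build-then-mutate two-pass structure with padded field tables zipped
-- with the index range, so zip truncation replaces all bounds checks (objective: alternative).

def pvJobTitles : List String :=
  ["Software Engineer", "Full Stack Developer", "Backend Developer", "Frontend Developer", "DevOps Engineer"]
def pvCompanies : List String :=
  ["Google", "Microsoft", "Amazon", "Meta", "Netflix", "Uber", "Airbnb", "Spotify"]

-- ===== PORT A =====
-- A builds the full list of identical mock dicts by a comprehension, then a second pass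
-- (enumerate) overwrites "title"/"company" on the first few entries via dict assignment.
def search_jobs_linkedin_scrape (keywords : String) (location : String) (max_results : Int) : List (List (String × String)) :=
  let mock_jobs : List (PySem.Dict String String) :=
    (PySem.List.pyRange 0 (min max_results 10) 1).map (fun i =>
      PySem.Dict.mk
        [("title", "Senior " ++ keywords ++ " Developer"),
         ("company", "Tech Innovators Inc"),
         ("location", location),
         ("description", "We are looking for an experienced " ++ keywords ++ " developer to join our dynamic team. You will work on cutting-edge projects and collaborate with cross-functional teams."),
         ("requirements", "5+ years experience with " ++ keywords ++ ", strong problem-solving skills, team player"),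
         ("url", "https://linkedin.com/jobs/view/12345" ++ PySem.Int.toStr i),
         ("posted_date", "2 days ago")])
  let mock_jobs :=
    (PySem.List.enumerate mock_jobs).map (fun p =>
      let job := p.2
      let job := if p.1 < PySem.List.len pvJobTitles then
          job.insert "title" (PySem.List.pyGetD pvJobTitles p.1 "" ++ " - " ++ keywords)
        else job
      let job := if p.1 < PySem.List.len pvCompanies then
          job.insert "company" (PySem.List.pyGetD pvCompanies p.1 "")
        else job
      job)
  mock_jobs.map (fun d => d.items)

-- ===== PORT B =====
-- B: precompute both 10-entry field tables, then zip them with the index range.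
def search_jobs_linkedin_scrape_alt (keywords : String) (location : String) (max_results : Int) : List (List (String × String)) :=
  let titles := pvJobTitles.map (fun t => t ++ " - " ++ keywords)
      ++ List.replicate 5 ("Senior " ++ keywords ++ " Developer")
  let companies := pvCompanies ++ List.replicate 2 "Tech Innovators Inc"
  ((PySem.List.pyRange 0 (min max_results 10) 1).zip (titles.zip companies)).map (fun p =>
    [("title", p.2.1),
     ("company", p.2.2),
     ("location", location),
     ("description", "We are looking for an experienced " ++ keywords ++ " developer to join our dynamic team. You will work on cutting-edge projects and collaborate with cross-functional teams."),
     ("requirements", "5+ years experience with " ++ keywords ++ ", strong problem-solving skills, team player"),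
     ("url", "https://linkedin.com/jobs/view/12345" ++ PySem.Int.toStr p.1),
     ("posted_date", "2 days ago")])

-- ===== PRECONDITION & SPEC =====
def Spec_search_jobs_linkedin_scrape (keywords : String) (location : String) (max_results : Int) (out : List (List (String × String))) : Prop := out = search_jobs_linkedin_scrape_alt keywords location max_results
instance (keywords : String) (location : String) (max_results : Int) (out : List (List (String × String))) : Decidable (Spec_search_jobs_linkedin_scrape keywords location max_results out) := by unfold Spec_search_jobs_linkedin_scrape; infer_instance

-- ===== CLAIM =====
def Claim_equal_search_jobs_linkedin_scrape : Prop := ∀ (keywords : String) (location : String) (max_results : Int), Dom_search_jobs_linkedin_scrape keywords location max_results → Spec_search_jobs_linkedin_scrape keywords location max_results (search_jobs_linkedin_scrape keywords location max_results)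

-- ===== LEMMAS AND PROOFS =====

-- both programs depend on max_results only through n := min max_results 10 ∈ (-∞, 10]
set_option maxHeartbeats 2000000 in
theorem pv_eq_on_bound (keywords location : String) (n : Int) (hn : n ≤ 10) :
    search_jobs_linkedin_scrape keywords location n = search_jobs_linkedin_scrape_alt keywords location n := by
  unfold search_jobs_linkedin_scrape search_jobs_linkedin_scrape_alt
  by_cases h0 : n ≤ 0
  · have : min n 10 = n := by omega
    simp [this, PySem.List.pyRange_one_eq_nil h0, PySem.List.enumerate_nil]
  · replace h0 : 0 < n := by omega
    have : min n 10 = n := by omega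
    rw [this]
    interval_cases n <;> rfl

-- ===== VERDICT =====
theorem search_jobs_linkedin_scrape_spec : Claim_equal_search_jobs_linkedin_scrape := by
  intro keywords location max_results _
  unfold Spec_search_jobs_linkedin_scrape
  have h := pv_eq_on_bound keywords location (min max_results 10) (by omega)
  unfold search_jobs_linkedin_scrape search_jobs_linkedin_scrape_alt at h ⊢
  simpa [min_assoc, min_self] using h
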